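-- pv_equiv track=rewrite | github.com/apbramah/cross_shore_dev | apps/head_payload_manager/main.py | is_plausible_fuji_name_part1
-- ===== SOURCE A (Python) =====
-- FUJI_RELAXED_NAME_MIN_ASCII = 8
--
-- def is_plausible_fuji_name_part1(s):
--     s = str(s or "").strip()
--     if len(s) < FUJI_RELAXED_NAME_MIN_ASCII or len(s) > 15:
--         return False
--     if len(s) < 3:
--         return False
--     if not ("A" <= s[0] <= "Z" and "A" <= s[1] <= "Z"):
--         return False
--     if not ("0" <= s[2] <= "9"):
--         return False
--     for ch in s:
--         if ("A" <= ch <= "Z") or ("0" <= ch <= "9") or ch in (" ", ".", "-", "/"):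
--             continue
--         return False
--     return True
-- ===== SOURCE B (Python) =====
-- def is_plausible_fuji_name_part1(s):
--     s = str(s or "").strip()
--     return _scan(s, 0)
--
-- def _scan(s, n):
--     # recursive position-indexed scanner: n = characters consumed so far
--     if not s:
--         return n >= 8          # accept iff at least 8 chars were seen
--     if n >= 15:
--         return False           # a 16th character -> too long
--     ch = s[0]
--     if n < 2:
--         ok = "A" <= ch <= "Z"
--     elif n == 2:
--         ok = "0" <= ch <= "9"
--     else:
--         ok = ("A" <= ch <= "Z") or ("0" <= ch <= "9") or ch in " .-/"
--     return ok and _scan(s[1:], n + 1)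
-- ===== Notes on version B (the rewrite author's own statement) =====
-- stated objective: alternative
-- what changed: A's up-front length guards, indexed prefix checks and separate character loop are replaced by a single recursive position-indexed scanner (a DFA): each character is validated by a rule chosen from the current position, length bounds fall out of the final counter, and there is no indexing or length precheck.
import Mathlib
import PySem

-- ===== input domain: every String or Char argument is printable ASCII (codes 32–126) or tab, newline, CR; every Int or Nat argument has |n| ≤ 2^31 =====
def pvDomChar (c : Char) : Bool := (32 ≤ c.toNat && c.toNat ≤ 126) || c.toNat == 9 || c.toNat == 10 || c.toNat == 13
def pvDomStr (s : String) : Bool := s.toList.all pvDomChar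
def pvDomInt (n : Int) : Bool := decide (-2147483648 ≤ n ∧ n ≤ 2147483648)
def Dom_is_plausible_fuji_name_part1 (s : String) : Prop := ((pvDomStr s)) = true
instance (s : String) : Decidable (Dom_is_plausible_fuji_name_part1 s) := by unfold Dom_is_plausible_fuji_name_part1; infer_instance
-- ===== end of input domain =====

-- B replaces A's guard chain (length bounds, indexed prefix checks, character loop) by a single
-- recursive position-indexed scanner; objective: alternative decomposition, no speed claim.

-- ===== PORT A =====
-- literal transliteration of A: strip, two length guards, indexed prefix checks, then the
-- for-loop with early 'return False' rendered as List.all over the same per-char test.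
def is_plausible_fuji_name_part1 (s : String) : Bool :=
  let cs := PySem.Chars.strip s.toList          -- s = str(s or "").strip(); on a String, (s or "") = s
  if cs.length < 8 || cs.length > 15 then false
  else if cs.length < 3 then false
  else
    match cs with
    | c0 :: c1 :: c2 :: _ =>
      if !(('A' ≤ c0 && c0 ≤ 'Z') && ('A' ≤ c1 && c1 ≤ 'Z')) then false
      else if !('0' ≤ c2 && c2 ≤ '9') then false
      else cs.all (fun ch =>
        (('A' ≤ ch && ch ≤ 'Z') || ('0' ≤ ch && ch ≤ '9') || [' ', '.', '-', '/'].contains ch))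
    | _ => false          -- unreachable: the guards above ensure len(s) ≥ 8

-- ===== PORT B =====
-- literal transliteration of Source B's recursive scanner _scan: empty string accepts iff n ≥ 8,
-- a 16th character rejects, otherwise the head is checked by the rule for position n and the
-- tail is scanned with n+1 (s[1:] on a str = tail of the char list).
def pvScan : List Char → Nat → Bool
  | [], n => decide (8 ≤ n)
  | ch :: rest, n =>
    if 15 ≤ n then false
    else
      (if n < 2 then 'A' ≤ ch && ch ≤ 'Z'
       else if n = 2 then '0' ≤ ch && ch ≤ '9'
       else ('A' ≤ ch && ch ≤ 'Z') || ('0' ≤ ch && ch ≤ '9') || [' ', '.', '-', '/'].contains ch)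
      && pvScan rest (n + 1)

def is_plausible_fuji_name_part1_alt (s : String) : Bool :=
  pvScan (PySem.Chars.strip s.toList) 0

-- ===== PRECONDITION & SPEC =====
def Spec_is_plausible_fuji_name_part1 (s : String) (out : Bool) : Prop := out = is_plausible_fuji_name_part1_alt s
instance (s : String) (out : Bool) : Decidable (Spec_is_plausible_fuji_name_part1 s out) := by unfold Spec_is_plausible_fuji_name_part1; infer_instance

-- ===== CLAIM (what is proved, stated in full; the proofs are below) =====
def Claim_equal_is_plausible_fuji_name_part1 : Prop := ∀ (s : String), Dom_is_plausible_fuji_name_part1 s → Spec_is_plausible_fuji_name_part1 s (is_plausible_fuji_name_part1 s)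

-- ===== LEMMAS AND PROOFS =====

def pvAllowed (ch : Char) : Bool :=
  ('A' ≤ ch && ch ≤ 'Z') || ('0' ≤ ch && ch ≤ '9') || [' ', '.', '-', '/'].contains ch

-- positional validity with the counter factored out of the scanner
def pvPosOK : Nat → List Char → Bool
  | _, [] => true
  | n, ch :: rest =>
    (if n < 2 then 'A' ≤ ch && ch ≤ 'Z'
     else if n = 2 then '0' ≤ ch && ch ≤ '9'
     else pvAllowed ch)
    && pvPosOK (n + 1) rest

theorem pvScan_eq (cs : List Char) : ∀ n, n ≤ 15 →
    pvScan cs n = (decide (8 ≤ n + cs.length ∧ n + cs.length ≤ 15) && pvPosOK n cs) := by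
  induction cs with
  | nil =>
    intro n hn
    simp only [pvScan, pvPosOK, List.length_nil, Nat.add_zero, Bool.and_true]
    rw [Bool.eq_iff_iff]; simp; omega
  | cons ch rest ih =>
    intro n hn
    by_cases h15 : 15 ≤ n
    · have : ¬ (8 ≤ n + (ch :: rest).length ∧ n + (ch :: rest).length ≤ 15) := by
        simp only [List.length_cons]; omega
      have hd : decide (8 ≤ n + (ch :: rest).length ∧ n + (ch :: rest).length ≤ 15) = false := by
        simpa using this
      simp only [pvScan, h15, if_true, hd, Bool.false_and]
    · rw [show pvScan (ch :: rest) n =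
          ((if n < 2 then 'A' ≤ ch && ch ≤ 'Z'
            else if n = 2 then '0' ≤ ch && ch ≤ '9'
            else ('A' ≤ ch && ch ≤ 'Z') || ('0' ≤ ch && ch ≤ '9') || [' ', '.', '-', '/'].contains ch)
           && pvScan rest (n + 1)) from by simp [pvScan, h15]]
      rw [ih (n + 1) (by omega)]
      have hlen : decide (8 ≤ n + 1 + rest.length ∧ n + 1 + rest.length ≤ 15)
          = decide (8 ≤ n + (ch :: rest).length ∧ n + (ch :: rest).length ≤ 15) := by
        apply decide_eq_decide.mpr
        simp only [List.length_cons]; omega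
      rw [hlen]
      simp only [pvPosOK, pvAllowed]
      cases decide (8 ≤ n + (ch :: rest).length ∧ n + (ch :: rest).length ≤ 15) <;>
        cases hc : (if n < 2 then 'A' ≤ ch && ch ≤ 'Z'
            else if n = 2 then '0' ≤ ch && ch ≤ '9'
            else ('A' ≤ ch && ch ≤ 'Z') || ('0' ≤ ch && ch ≤ '9') || [' ', '.', '-', '/'].contains ch) <;>
          simp

theorem pvPosOK_ge3 (cs : List Char) : ∀ n, 3 ≤ n → pvPosOK n cs = cs.all pvAllowed := by
  induction cs with
  | nil => intro n _; simp [pvPosOK]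
  | cons ch rest ih =>
    intro n hn
    have h2 : ¬ n < 2 := by omega
    have h2' : ¬ n = 2 := by omega
    simp [pvPosOK, h2, h2', ih (n + 1) (by omega)]

theorem pv_main (cs : List Char) :
    (if cs.length < 8 || cs.length > 15 then false
     else if cs.length < 3 then false
     else
       match cs with
       | c0 :: c1 :: c2 :: _ =>
         if !(('A' ≤ c0 && c0 ≤ 'Z') && ('A' ≤ c1 && c1 ≤ 'Z')) then false
         else if !('0' ≤ c2 && c2 ≤ '9') then false
         else cs.all (fun ch =>
           (('A' ≤ ch && ch ≤ 'Z') || ('0' ≤ ch && ch ≤ '9') || [' ', '.', '-', '/'].contains ch))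
       | _ => false)
    = pvScan cs 0 := by
  rw [pvScan_eq cs 0 (by omega), Nat.zero_add]
  by_cases hlen : 8 ≤ cs.length ∧ cs.length ≤ 15
  · obtain ⟨hc8, hc15⟩ := hlen
    rcases cs with _ | ⟨c0, _ | ⟨c1, _ | ⟨c2, rest⟩⟩⟩
    · simp at hc8
    · simp at hc8
    · simp at hc8
    · have h1 : ((c0 :: c1 :: c2 :: rest).length < 8 || (c0 :: c1 :: c2 :: rest).length > 15) = false := by
        simp only [Bool.or_eq_false_iff, decide_eq_false_iff_not, not_lt, gt_iff_lt]
        refine ⟨?_, ?_⟩ <;> simp only [List.length_cons] at * <;> omega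
      have h3 : decide (8 ≤ (c0 :: c1 :: c2 :: rest).length ∧ (c0 :: c1 :: c2 :: rest).length ≤ 15) = true := by
        simp only [decide_eq_true_eq]; exact ⟨hc8, hc15⟩
      simp only [h1, h3, Bool.false_eq_true, if_false, Bool.true_and]
      rw [show pvPosOK 0 (c0 :: c1 :: c2 :: rest)
          = (('A' ≤ c0 && c0 ≤ 'Z') && (('A' ≤ c1 && c1 ≤ 'Z') && (('0' ≤ c2 && c2 ≤ '9') && rest.all pvAllowed))) from by
        simp [pvPosOK, pvPosOK_ge3 rest 3 (by omega)]]
      cases h0 : ('A' ≤ c0 && c0 ≤ 'Z') <;> cases h1' : ('A' ≤ c1 && c1 ≤ 'Z') <;>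
        cases h2' : ('0' ≤ c2 && c2 ≤ '9') <;>
          simp [pvAllowed, List.all_cons, h0, h1', h2', List.contains_cons,
            show ¬ (rest.length + 1 + 1 + 1 < 3) from by omega] <;>
          (try (congr 1; funext ch; simp [pvAllowed, List.contains_cons]))
  · have h1 : (cs.length < 8 || cs.length > 15) = true := by
      simp only [Bool.or_eq_true, decide_eq_true_eq, gt_iff_lt]; omega
    rw [if_pos h1, show decide (8 ≤ cs.length ∧ cs.length ≤ 15) = false from by simp [hlen]]
    simp

-- ===== VERDICT (by name: the statement is the Claim_ definition above) =====
theorem is_plausible_fuji_name_part1_spec : Claim_equal_is_plausible_fuji_name_part1 := by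
  intro s _
  unfold Spec_is_plausible_fuji_name_part1 is_plausible_fuji_name_part1 is_plausible_fuji_name_part1_alt
  exact pv_main _
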